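-- pv_equiv track=rewrite | github.com/MatrixManAtYrService/tomriddle | tomriddle/fragments.py | gen_startend
-- ===== SOURCE A (Python) =====
-- def gen_startend(corpus):
--     """
--     Three or four letter strings that start or end words like ant-, aard-,
--     -azy, or -gist.
--     """
--
--     begins = {}
--     ends = {}
--
--     def add(store, partial_word):
--         """register the partial word and keep a count."""
--         store.setdefault(partial_word, 0)
--         store[partial_word] += 1
--
--     def scan(num):
--         """walk the corpus, gather partial words."""
--         for word in corpus:
--             if len(word) > num:
--                 add(begins, word[:num])
--
--     scan(3)
--     scan(4)
--
--     return (begins, ends)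
-- ===== SOURCE B (Python) =====
-- def gen_startend(corpus):
--     """
--     Three or four letter strings that start or end words like ant-, aard-,
--     -azy, or -gist.
--     """
--     begins = {}
--     for n in (3, 4):
--         for word in corpus:
--             prefix = word[:n]
--             if len(word) > n and prefix not in begins:
--                 begins[prefix] = sum(1 for v in corpus if len(v) > n and v[:n] == prefix)
--     return (begins, {})
-- ===== Notes on version B (the rewrite author's own statement) =====
-- stated objective: alternative
-- what changed: Replaces A's incremental setdefault/+=1 counting with a dedup-then-count scheme: each prefix is inserted exactly once, on first sight, with its total frequency computed then and there by a counting scan of the corpus, so no dict value is ever updated.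
import Mathlib
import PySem

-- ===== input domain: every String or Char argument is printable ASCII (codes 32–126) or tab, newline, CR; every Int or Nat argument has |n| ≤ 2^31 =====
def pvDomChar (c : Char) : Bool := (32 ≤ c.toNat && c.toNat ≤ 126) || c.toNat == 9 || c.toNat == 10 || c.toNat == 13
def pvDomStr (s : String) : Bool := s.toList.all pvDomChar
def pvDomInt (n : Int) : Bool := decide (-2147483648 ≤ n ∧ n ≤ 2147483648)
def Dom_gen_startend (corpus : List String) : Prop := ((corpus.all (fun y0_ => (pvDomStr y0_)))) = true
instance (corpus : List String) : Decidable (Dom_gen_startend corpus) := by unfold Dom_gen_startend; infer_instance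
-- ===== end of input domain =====

-- B replaces A's incremental setdefault/+=1 counting by dedup-then-count: each pfx is
-- inserted once, on first sight, with its total frequency computed by a counting scan of
-- the corpus, so no stored count is ever updated (objective: alternative algorithm).

-- ===== PORT A =====
-- add(store, partial_word): store.setdefault(partial_word, 0); store[partial_word] += 1
def pvAdd (store : PySem.Dict String Int) (partial_word : String) : PySem.Dict String Int :=
  let s := store.setdefault partial_word 0
  s.insert partial_word (s.getD partial_word 0 + 1)

-- scan(num): for word in corpus: if len(word) > num: add(begins, word[:num])
def pvScan (corpus : List String) (begins : PySem.Dict String Int) (num : Int) :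
    PySem.Dict String Int :=
  corpus.foldl
    (fun b word =>
      if PySem.Str.len word > num then pvAdd b (PySem.Str.slice word none (some num)) else b)
    begins

def gen_startend (corpus : List String) : (List (String × Int)) × (List (String × Int)) :=
  let begins : PySem.Dict String Int := PySem.Dict.empty
  let ends : PySem.Dict String Int := PySem.Dict.empty
  let begins := pvScan corpus begins 3
  let begins := pvScan corpus begins 4
  (begins.items, ends.items)

-- ===== PORT B =====
-- sum(1 for v in corpus if len(v) > n and v[:n] == pfx)
def pvSumCount (corpus : List String) (n : Int) (pfx : String) : Int :=
  corpus.foldl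
    (fun c v =>
      if PySem.Str.len v > n ∧ PySem.Str.slice v none (some n) = pfx then c + 1 else c)
    0

def gen_startend_alt (corpus : List String) : (List (String × Int)) × (List (String × Int)) :=
  -- begins = {}; for n in (3, 4): for word in corpus: pfx = word[:n];
  --   if len(word) > n and pfx not in begins: begins[pfx] = sum(...)
  let begins :=
    [(3 : Int), 4].foldl
      (fun begins n =>
        corpus.foldl
          (fun begins word =>
            let pfx := PySem.Str.slice word none (some n)
            if PySem.Str.len word > n ∧ begins.contains pfx = false then
              begins.insert pfx (pvSumCount corpus n pfx)
            else begins)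
          begins)
      PySem.Dict.empty
  (begins.items, [])

-- ===== PRECONDITION & SPEC =====
def Spec_gen_startend (corpus : List String) (out : (List (String × Int)) × (List (String × Int))) : Prop := out = gen_startend_alt corpus
instance (corpus : List String) (out : (List (String × Int)) × (List (String × Int))) : Decidable (Spec_gen_startend corpus out) := by unfold Spec_gen_startend; infer_instance

-- ===== CLAIM (what is proved, stated in full; the proofs are below) =====
def Claim_equal_gen_startend : Prop := ∀ (corpus : List String), Dom_gen_startend corpus → Spec_gen_startend corpus (gen_startend corpus)

-- ===== LEMMAS AND PROOFS =====

-- the stream of n-pfxes A counts and B deduplicates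
def pvS (corpus : List String) (n : Int) : List String :=
  (corpus.filter (fun w => PySem.Str.len w > n)).map (fun w => PySem.Str.slice w none (some n))

-- add is an insert of the incremented count
theorem pvAdd_eq (d : PySem.Dict String Int) (p : String) :
    pvAdd d p = d.insert p (d.getD p 0 + 1) := by
  unfold pvAdd
  by_cases h : d.contains p = true
  · rw [PySem.Dict.setdefault_of_contains d 0 h]
  · rw [PySem.Dict.setdefault_of_not_contains d 0 (by simpa using h)]
    rw [PySem.Dict.insert_insert_self, PySem.Dict.getD_insert_self,
      PySem.Dict.getD_of_not_contains d 0 (by simpa using h)]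

-- one scan is the counting fold over the pfx list for that num
theorem pvScan_eq (corpus : List String) (b : PySem.Dict String Int) (num : Int) :
    pvScan corpus b num =
      ((pvS corpus num).foldl (fun d x => d.insert x (d.getD x 0 + 1)) b) := by
  unfold pvScan pvS
  have h1 := PySem.List.foldl_congr_mem corpus
    (fun b word =>
      if PySem.Str.len word > num then pvAdd b (PySem.Str.slice word none (some num)) else b)
    (fun b word =>
      if PySem.Str.len word > num then
        b.insert (PySem.Str.slice word none (some num))
          (b.getD (PySem.Str.slice word none (some num)) 0 + 1)
      else b)
    b
    (by
      intro acc x _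
      dsimp only
      by_cases h : PySem.Str.len x > num
      · rw [if_pos h, if_pos h, pvAdd_eq]
      · rw [if_neg h, if_neg h])
  rw [h1, PySem.List.foldl_ite_eq_foldl_filter (p := fun w => PySem.Str.len w > num),
    List.foldl_map]

-- A's items: the counter of the concatenated pfx stream
theorem gen_startend_items (corpus : List String) :
    gen_startend corpus =
      (((PySem.Set.ofList (pvS corpus 3 ++ pvS corpus 4)).map
        (fun k => (k, ((pvS corpus 3 ++ pvS corpus 4).count k : Int)))), []) := by
  unfold gen_startend
  dsimp only
  rw [pvScan_eq, pvScan_eq, ← List.foldl_append,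
    PySem.Dict.foldl_insert_getD_add_one_eq_counter, PySem.Dict.items_counter]
  rfl

-- B's counting scan is the count in the pfx stream
theorem pvSumCount_eq (corpus : List String) (n : Int) (p : String) :
    pvSumCount corpus n p = ((pvS corpus n).count p : Int) := by
  unfold pvSumCount pvS
  have aux : ∀ (l : List String) (c : Int),
      l.foldl
        (fun c v =>
          if PySem.Str.len v > n ∧ PySem.Str.slice v none (some n) = p then c + 1 else c) c
      = c + (l.countP
          (fun v => decide (PySem.Str.len v > n ∧ PySem.Str.slice v none (some n) = p)) : Int) := by
    intro l
    induction l with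
    | nil => intro c; simp
    | cons x xs ih =>
      intro c
      by_cases h : PySem.Str.len x > n ∧ PySem.Str.slice x none (some n) = p
      · simp only [List.foldl_cons, if_pos h, ih, List.countP_cons, decide_eq_true h]
        push_cast; ring
      · simp only [List.foldl_cons, if_neg h, ih, List.countP_cons, decide_eq_false h]
        push_cast; ring
  rw [aux]
  have : ((corpus.filter (fun w => PySem.Str.len w > n)).map
        (fun w => PySem.Str.slice w none (some n))).count p
      = corpus.countP
          (fun v => decide (PySem.Str.len v > n ∧ PySem.Str.slice v none (some n) = p)) := by
    rw [List.count, List.countP_map, List.countP_filter]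
    apply List.countP_congr
    intro v _
    by_cases h1 : PySem.Str.len v > n <;> by_cases h2 : PySem.Str.slice v none (some n) = p <;>
      simp [h2]
  rw [this]
  omega

-- B's inner loop over fresh keys: items append the new deduplicated prefixes
theorem pvLoop_items (n : Int) (v : String → Int) (l : List String) :
    ∀ (d : PySem.Dict String Int),
    (l.foldl
        (fun d w =>
          if PySem.Str.len w > n ∧ d.contains (PySem.Str.slice w none (some n)) = false then
            d.insert (PySem.Str.slice w none (some n)) (v (PySem.Str.slice w none (some n)))
          else d)
        d).items
      = d.items ++
        (((PySem.Set.ofList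
            ((l.filter (fun w => PySem.Str.len w > n)).map
              (fun w => PySem.Str.slice w none (some n)))).filter
          (fun k => !d.contains k)).map (fun k => (k, v k))) := by
  induction l with
  | nil => intro d; simp [PySem.Set.ofList_nil]
  | cons w l ih =>
    intro d
    by_cases hl : PySem.Str.len w > n
    · by_cases hc : d.contains (PySem.Str.slice w none (some n)) = true
      · have hcond : ¬ (PySem.Str.len w > n ∧
            d.contains (PySem.Str.slice w none (some n)) = false) := by simp [hc]
        rw [List.foldl_cons, if_neg hcond, ih d]
        congr 1
        rw [List.filter_cons_of_pos (by simpa using hl), List.map_cons,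
          PySem.Set.ofList_cons, List.filter_cons_of_neg (by simp [hc])]
        congr 1
        unfold PySem.Set.discard
        rw [List.filter_filter]
        apply List.filter_congr
        intro y _
        by_cases hy : y = PySem.Str.slice w none (some n)
        · simp [hy, hc]
        · simp [hy]
      · have hcf : d.contains (PySem.Str.slice w none (some n)) = false := by
          simpa using hc
        rw [List.foldl_cons, if_pos ⟨hl, hcf⟩,
          ih (d.insert (PySem.Str.slice w none (some n))
            (v (PySem.Str.slice w none (some n)))),
          PySem.Dict.items_insert_of_not_contains _ _ hcf,
          List.filter_cons_of_pos (by simpa using hl), List.map_cons,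
          PySem.Set.ofList_cons, List.filter_cons_of_pos (by simp [hcf]),
          List.map_cons, List.append_assoc, List.singleton_append]
        congr 2
        unfold PySem.Set.discard
        rw [List.filter_filter]
        congr 1
        apply List.filter_congr
        intro y _
        rw [PySem.Dict.contains_insert]
        by_cases hy : y = PySem.Str.slice w none (some n)
        · simp [hy]
        · simp [Bool.and_comm]
    · rw [List.foldl_cons, if_neg (by intro h; exact hl h.1), ih d,
        List.filter_cons_of_neg (by simpa using hl)]

-- the same loop lemma phrased through pvS (definitional)
theorem pvLoop_items_S (n : Int) (v : String → Int) (l : List String)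
    (d : PySem.Dict String Int) :
    (l.foldl
        (fun d w =>
          if PySem.Str.len w > n ∧ d.contains (PySem.Str.slice w none (some n)) = false then
            d.insert (PySem.Str.slice w none (some n)) (v (PySem.Str.slice w none (some n)))
          else d)
        d).items
      = d.items ++
        (((PySem.Set.ofList (pvS l n)).filter (fun k => !d.contains k)).map
          (fun k => (k, v k))) :=
  pvLoop_items n v l d

-- every n-pfx has length n (for 0 ≤ n)
theorem pvS_len (corpus : List String) (n : Int) (hn : 0 ≤ n) :
    ∀ k ∈ pvS corpus n, PySem.Str.len k = n := by
  intro k hk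
  unfold pvS at hk
  rcases List.mem_map.mp hk with ⟨w, hw, rfl⟩
  rcases List.mem_filter.mp hw with ⟨-, hlen⟩
  have hlen' : PySem.Str.len w > n := by simpa using hlen
  unfold PySem.Str.len at hlen' ⊢
  rw [PySem.Str.slice]
  rw [String.toList_ofList, PySem.Chars.slice_eq_listSlice, PySem.List.slice_to _ hn]
  rw [List.length_take]
  omega

theorem gen_startend_alt_items (corpus : List String) :
    gen_startend_alt corpus =
      ((PySem.Set.ofList (pvS corpus 3)).map (fun k => (k, ((pvS corpus 3).count k : Int)))
        ++ (PySem.Set.ofList (pvS corpus 4)).map (fun k => (k, ((pvS corpus 4).count k : Int))),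
       []) := by
  unfold gen_startend_alt
  dsimp only [List.foldl_cons, List.foldl_nil]
  rw [pvLoop_items_S 4 (pvSumCount corpus 4) corpus]
  have h3 := pvLoop_items_S 3 (pvSumCount corpus 3) corpus PySem.Dict.empty
  have hk : (corpus.foldl
      (fun d w =>
        if PySem.Str.len w > 3 ∧ d.contains (PySem.Str.slice w none (some 3)) = false then
          d.insert (PySem.Str.slice w none (some 3))
            (pvSumCount corpus 3 (PySem.Str.slice w none (some 3)))
        else d)
      PySem.Dict.empty).keys
      = PySem.Set.ofList (pvS corpus 3) := by
    simp only [PySem.Dict.keys, h3]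
    simp [PySem.Dict.empty, List.map_map, Function.comp_def]
  have hfilt : ∀ k ∈ PySem.Set.ofList (pvS corpus 4),
      (!(corpus.foldl
        (fun d w =>
          if PySem.Str.len w > 3 ∧ d.contains (PySem.Str.slice w none (some 3)) = false then
            d.insert (PySem.Str.slice w none (some 3))
              (pvSumCount corpus 3 (PySem.Str.slice w none (some 3)))
          else d)
        PySem.Dict.empty).contains k) = true := by
    intro k hkmem
    rw [PySem.Dict.contains_eq_decide_mem_keys, hk]
    have h4 : PySem.Str.len k = 4 :=
      pvS_len corpus 4 (by norm_num) k ((PySem.Set.mem_ofList _ _).mp hkmem)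
    have : k ∉ pvS corpus 3 := by
      intro hmem
      have := pvS_len corpus 3 (by norm_num) k hmem
      omega
    simp [PySem.Set.mem_ofList, this]
  rw [h3, List.filter_eq_self.mpr hfilt]
  simp only [pvSumCount_eq]
  simp [PySem.Dict.empty]

-- prefixes of different lengths never collide
theorem pvS_disjoint (corpus : List String) (k : String) (h3 : k ∈ pvS corpus 3) :
    k ∉ pvS corpus 4 := by
  intro h4
  have a3 := pvS_len corpus 3 (by norm_num) k h3
  have a4 := pvS_len corpus 4 (by norm_num) k h4
  omega

-- ===== VERDICT (by name: the statement is the Claim_ definition above) =====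
theorem gen_startend_spec : Claim_equal_gen_startend := by
  intro corpus _
  unfold Spec_gen_startend
  rw [gen_startend_items, gen_startend_alt_items]
  have hsplit : PySem.Set.ofList (pvS corpus 3 ++ pvS corpus 4)
      = PySem.Set.ofList (pvS corpus 3) ++ PySem.Set.ofList (pvS corpus 4) := by
    rw [PySem.Set.ofList_append, PySem.Set.update_eq_append_filter]
    congr 1
    apply List.filter_eq_self.mpr
    intro y hy
    have hy4 : y ∈ pvS corpus 4 := (PySem.Set.mem_ofList _ _).mp hy
    have : y ∉ pvS corpus 3 := fun h => pvS_disjoint corpus y h hy4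
    simp [this]
  rw [hsplit, List.map_append]
  congr 1
  congr 1
  · apply List.map_congr_left
    intro k hkm
    have hk3 : k ∈ pvS corpus 3 := (PySem.Set.mem_ofList _ _).mp hkm
    have : (pvS corpus 4).count k = 0 := List.count_eq_zero.mpr (pvS_disjoint corpus k hk3)
    rw [List.count_append, this]
    simp
  · apply List.map_congr_left
    intro k hkm
    have hk4 : k ∈ pvS corpus 4 := (PySem.Set.mem_ofList _ _).mp hkm
    have : (pvS corpus 3).count k = 0 := by
      apply List.count_eq_zero.mpr
      intro h3
      exact pvS_disjoint corpus k h3 hk4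
    rw [List.count_append, this]
    simp
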